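-- pv_equiv track=rewrite | github.com/andreicosmind/CodeWars | Data_Reverse.py | data_reverse
-- ===== SOURCE A (Python) =====
-- def data_reverse(data):
--     data1 = []
--     b = []
--     for x in range (len(data)//8):
-- 	    data1.append(data[x*8:x*8+8])
--     for x in data1[::-1]:
-- 	    b.extend(x)
--     return b
-- ===== SOURCE B (Python) =====
-- def data_reverse(data):
--     n = len(data) // 8
--     b = []
--     for k in range(n):
--         s = (n - 1 - k) * 8
--         b.extend(data[s:s + 8])
--     return b
-- ===== Notes on version B (the rewrite author's own statement) =====
-- stated objective: simpler
-- what changed: Single reverse-indexed pass that extends the result with the (n-1-k)-th 8-element chunk directly, instead of building an intermediate chunk list and then reversing it in a second pass.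
import Mathlib
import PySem

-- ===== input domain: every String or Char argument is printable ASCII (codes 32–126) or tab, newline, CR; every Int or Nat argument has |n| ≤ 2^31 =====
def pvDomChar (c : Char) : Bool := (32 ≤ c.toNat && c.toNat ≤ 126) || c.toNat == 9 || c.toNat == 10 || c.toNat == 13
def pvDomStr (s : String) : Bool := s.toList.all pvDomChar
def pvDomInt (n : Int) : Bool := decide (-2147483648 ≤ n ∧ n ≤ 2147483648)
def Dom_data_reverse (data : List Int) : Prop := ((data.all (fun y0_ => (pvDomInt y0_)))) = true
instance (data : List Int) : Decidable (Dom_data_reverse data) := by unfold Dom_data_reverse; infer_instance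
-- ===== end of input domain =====

-- B (one reverse-indexed pass extending with chunks directly) is simpler than A
-- (build chunk list, reverse it, then concatenate); equal return value proved below.

-- ===== PORT A =====
def data_reverse (data : List Int) : List Int :=
  let data1 : List (List Int) :=
    (PySem.List.pyRange 0 (PySem.Int.floordiv (data.length : Int) 8) 1).foldl
      (fun acc x => acc ++ [PySem.List.slice data (some (x * 8)) (some (x * 8 + 8))]) []
  -- data1[::-1] is reversal (PySem.List.slice?_none_none_neg_one: slice? l none none (-1) = some l.reverse)
  data1.reverse.foldl (fun b x => b ++ x) []

-- ===== PORT B =====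
def data_reverse_alt (data : List Int) : List Int :=
  let n : Int := PySem.Int.floordiv (data.length : Int) 8
  (PySem.List.pyRange 0 n 1).foldl
    (fun b k => b ++ PySem.List.slice data (some ((n - 1 - k) * 8)) (some ((n - 1 - k) * 8 + 8))) []

-- ===== PRECONDITION & SPEC =====
def Spec_data_reverse (data : List Int) (out : List Int) : Prop := out = data_reverse_alt data
instance (data : List Int) (out : List Int) : Decidable (Spec_data_reverse data out) := by unfold Spec_data_reverse; infer_instance

-- ===== CLAIM (what is proved, stated in full; the proofs are below) =====
def Claim_equal_data_reverse : Prop := ∀ (data : List Int), Dom_data_reverse data → Spec_data_reverse data (data_reverse data)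

-- ===== LEMMAS AND PROOFS =====

-- foldl with (· ++ ·) from init is init ++ flatten
theorem pv_foldl_concat (l : List (List Int)) (init : List Int) :
    l.foldl (fun b x => b ++ x) init = init ++ l.flatten := by
  induction l generalizing init with
  | nil => simp
  | cons h t ih => simp [List.foldl_cons, ih, List.append_assoc]

-- foldl appending g k over a list is flatten of the map
theorem pv_foldl_extend (l : List Int) (g : Int → List Int) (init : List Int) :
    l.foldl (fun b k => b ++ g k) init = init ++ (l.map g).flatten := by
  induction l generalizing init with
  | nil => simp
  | cons h t ih => simp [List.foldl_cons, ih, List.append_assoc]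

-- A's first loop builds exactly the map of the chunk function over the range
theorem pv_build_chunks (l : List Int) (f : Int → List Int) (init : List (List Int)) :
    l.foldl (fun acc x => acc ++ [f x]) init = init ++ l.map f := by
  induction l generalizing init with
  | nil => simp
  | cons h t ih => simp [List.foldl_cons, ih]

-- reversing range m and mapping f = mapping (fun k => f (m-1-k)) over range m
theorem pv_reverse_map_range (m : Nat) (f : Nat → List Int) :
    ((List.range m).map f).reverse = (List.range m).map (fun k => f (m - 1 - k)) := by
  apply List.ext_getElem
  · simp
  · intro i h1 h2
    simp [List.getElem_reverse]

theorem pv_main (data : List Int) : data_reverse data = data_reverse_alt data := by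
  unfold data_reverse data_reverse_alt
  have hfd : PySem.Int.floordiv (data.length : Int) 8 = ((data.length / 8 : Nat) : Int) := by
    exact_mod_cast PySem.Int.floordiv_natCast data.length 8
  set m : Nat := data.length / 8 with hm
  rw [hfd, pv_build_chunks, pv_foldl_concat, pv_foldl_extend]
  rw [PySem.List.pyRange_one]
  simp only [Int.sub_zero, Int.toNat_natCast, List.nil_append, zero_add, List.map_map]
  rw [pv_reverse_map_range m ((fun x : Int =>
      PySem.List.slice data (some (x * 8)) (some (x * 8 + 8))) ∘ (fun k : Nat => (k : Int)))]
  congr 1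
  apply List.map_congr_left
  intro k hk
  have hk' : k < m := List.mem_range.mp hk
  have : ((m : Int) - 1 - (k : Int)) = ((m - 1 - k : Nat) : Int) := by omega
  simp [Function.comp, this]

-- ===== VERDICT (by name: the statement is the Claim_ definition above) =====
theorem data_reverse_spec : Claim_equal_data_reverse := by
  intro data _
  exact pv_main data
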